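-- pv_equiv track=rewrite | github.com/MrBrantCode/unitest_baseline | mut_generate/mist_train_cf/cf_69443/solution.py | largest_alpha_subset
-- ===== SOURCE A (Python) =====
-- def largest_alpha_subset(text):
--     largest = 0
--     count = 0
--     for char in text:
--         if char.isalpha():
--             count += 1
--             if count > largest:
--                 largest = count
--         else:
--             count = 0
--     return largest
-- ===== SOURCE B (Python) =====
-- def largest_alpha_subset(text):
--     # Two-stage: collect the lengths of all maximal alphabetic runs, then take the max.
--     runs = []
--     i, n = 0, len(text)
--     while i < n:
--         if text[i].isalpha():
--             j = i + 1
--             while j < n and text[j].isalpha():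
--                 j += 1
--             runs.append(j - i)
--             i = j
--         else:
--             i += 1
--     return max(runs, default=0)
-- ===== Notes on version B (the rewrite author's own statement) =====
-- stated objective: alternative
-- what changed: Replaces A's incremental running counter with a two-stage pass that first scans out each maximal alphabetic run (inner scan to the run's end), collects the run lengths in a list, and then returns their max with default 0.
import Mathlib
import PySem

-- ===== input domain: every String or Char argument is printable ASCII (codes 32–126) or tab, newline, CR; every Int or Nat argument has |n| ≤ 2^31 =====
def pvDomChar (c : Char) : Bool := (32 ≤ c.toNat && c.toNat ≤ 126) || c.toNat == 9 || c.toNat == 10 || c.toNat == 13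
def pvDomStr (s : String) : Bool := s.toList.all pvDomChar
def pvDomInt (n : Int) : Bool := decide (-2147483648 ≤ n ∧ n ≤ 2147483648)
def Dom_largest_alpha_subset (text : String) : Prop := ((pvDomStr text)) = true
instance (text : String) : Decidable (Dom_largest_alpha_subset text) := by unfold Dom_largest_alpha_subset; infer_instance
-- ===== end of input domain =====

-- B groups the string into maximal alphabetic runs and takes the max run length (alternative decomposition; same O(n) cost).

-- ===== PORT A =====
-- A: single pass with a running counter reset on non-letters and a running maximum.
def largest_alpha_subset (text : String) : Int :=
  (text.toList.foldl
    (fun (s : Int × Int) ch =>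
      if PySem.Chars.isalpha ch then
        let count := s.2 + 1
        (if count > s.1 then count else s.1, count)
      else (s.1, 0))
    (0, 0)).1

-- ===== PORT B =====
-- B helper: lengths of the maximal alphabetic runs, in order (the `runs` list of Source B;
-- the inner while loop that scans to the end of a run is takeWhile/dropWhile).
def pvAltRuns (cs : List Char) : List Int :=
  match cs with
  | [] => []
  | c :: t =>
    if PySem.Chars.isalpha c then
      ((1 + (t.takeWhile PySem.Chars.isalpha).length : Nat) : Int)
        :: pvAltRuns (t.dropWhile PySem.Chars.isalpha)
    else pvAltRuns t
termination_by cs.length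
decreasing_by
  · exact Nat.lt_succ_of_le (List.length_dropWhile_le _ _)
  · exact Nat.lt_succ_self _

def largest_alpha_subset_alt (text : String) : Int :=
  PySem.List.maxD (pvAltRuns text.toList) (fun x => x) 0

-- ===== PRECONDITION & SPEC =====
def Spec_largest_alpha_subset (text : String) (out : Int) : Prop := out = largest_alpha_subset_alt text
instance (text : String) (out : Int) : Decidable (Spec_largest_alpha_subset text out) := by unfold Spec_largest_alpha_subset; infer_instance

-- ===== CLAIM (what is proved, stated in full; the proofs are below) =====
def Claim_equal_largest_alpha_subset : Prop := ∀ (text : String), Dom_largest_alpha_subset text → Spec_largest_alpha_subset text (largest_alpha_subset text)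

-- ===== LEMMAS AND PROOFS =====

-- A's loop body, named for the proofs.
def pvStepA (s : Int × Int) (ch : Char) : Int × Int :=
  if PySem.Chars.isalpha ch then
    let count := s.2 + 1
    (if count > s.1 then count else s.1, count)
  else (s.1, 0)

theorem pvStepA_alpha (s : Int × Int) (ch : Char) (h : PySem.Chars.isalpha ch = true) :
    pvStepA s ch = (max s.1 (s.2 + 1), s.2 + 1) := by
  simp [pvStepA, h, max_def]
  split <;> split <;> omega

theorem pvStepA_not_alpha (s : Int × Int) (ch : Char) (h : PySem.Chars.isalpha ch = false) :
    pvStepA s ch = (s.1, 0) := by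
  simp [pvStepA, h]

-- Folding A's step over a nonempty all-alphabetic block from (l, c).
theorem pvFold_alpha_block (as : List Char) (h : ∀ a ∈ as, PySem.Chars.isalpha a = true)
    (l c : Int) (hne : as ≠ []) :
    List.foldl pvStepA (l, c) as = (max l (c + as.length), c + as.length) := by
  induction as generalizing l c with
  | nil => exact absurd rfl hne
  | cons a t ih =>
    have ha : PySem.Chars.isalpha a = true := h a (List.mem_cons_self)
    have ht : ∀ x ∈ t, PySem.Chars.isalpha x = true := fun x hx => h x (List.mem_cons_of_mem a hx)
    simp only [List.foldl_cons, pvStepA_alpha (l, c) a ha]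
    cases t with
    | nil => simp
    | cons b u =>
      rw [ih ht _ _ (by simp)]
      simp only [Prod.mk.injEq, List.length_cons, max_def]
      push_cast
      constructor
      · split_ifs <;> omega
      · ring

-- Main invariant (fuel n bounds the list length for the strong induction):
-- A's fold from (l, 0) computes the running max of l and the run lengths.
theorem pvMainAux (n : Nat) : ∀ (cs : List Char), cs.length ≤ n → ∀ (l : Int),
    (List.foldl pvStepA (l, 0) cs).1 = List.foldl max l (pvAltRuns cs) := by
  induction n with
  | zero =>
    intro cs h l
    have : cs = [] := List.eq_nil_of_length_eq_zero (by omega)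
    subst this; simp [pvAltRuns]
  | succ n ih =>
    intro cs h l
    cases cs with
    | nil => simp [pvAltRuns]
    | cons c t =>
      by_cases hc : PySem.Chars.isalpha c = true
      · have hsplit : c :: t = (c :: t.takeWhile PySem.Chars.isalpha) ++ t.dropWhile PySem.Chars.isalpha := by
          simp [List.takeWhile_append_dropWhile]
        have hall : ∀ a ∈ c :: t.takeWhile PySem.Chars.isalpha, PySem.Chars.isalpha a = true := by
          intro a ha
          rcases List.mem_cons.mp ha with h' | h'
          · exact h' ▸ hc
          · exact List.mem_takeWhile_imp h'
        have hruns : pvAltRuns (c :: t)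
            = ((1 + (t.takeWhile PySem.Chars.isalpha).length : Nat) : Int)
              :: pvAltRuns (t.dropWhile PySem.Chars.isalpha) := by
          rw [pvAltRuns]; simp [hc]
        have hk : (0 : Int) + ((c :: t.takeWhile PySem.Chars.isalpha).length : Int)
            = ((1 + (t.takeWhile PySem.Chars.isalpha).length : Nat) : Int) := by
          push_cast [List.length_cons]; ring
        conv_lhs => rw [hsplit]
        rw [List.foldl_append, pvFold_alpha_block _ hall l 0 (by simp), hk, hruns,
          List.foldl_cons]
        have ht : t.length ≤ n := by simpa using h
        cases hd : t.dropWhile PySem.Chars.isalpha with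
        | nil => simp [pvAltRuns]
        | cons b u =>
          have hb : PySem.Chars.isalpha b = false := by
            have := List.head_dropWhile_not PySem.Chars.isalpha (l := t) (by simp [hd])
            simpa [hd] using this
          have hu : u.length ≤ n := by
            have h1 := List.length_dropWhile_le PySem.Chars.isalpha t
            rw [hd] at h1; simp at h1; omega
          have hr2 : pvAltRuns (b :: u) = pvAltRuns u := by rw [pvAltRuns]; simp [hb]
          rw [hr2, List.foldl_cons, pvStepA_not_alpha _ b hb]
          exact ih u hu _
      · have hc' : PySem.Chars.isalpha c = false := by simpa using hc
        rw [List.foldl_cons, pvStepA_not_alpha _ c hc']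
        have hruns : pvAltRuns (c :: t) = pvAltRuns t := by rw [pvAltRuns]; simp [hc']
        rw [hruns]
        exact ih t (by simpa using h) l

theorem pvMain (cs : List Char) (l : Int) :
    (List.foldl pvStepA (l, 0) cs).1 = List.foldl max l (pvAltRuns cs) :=
  pvMainAux cs.length cs le_rfl l

-- max(runs, default=0) equals the fold of max over the runs starting at 0, since every run length is positive.
theorem pvAltRuns_pos (cs : List Char) : ∀ r ∈ pvAltRuns cs, 1 ≤ r := by
  match cs with
  | [] => simp [pvAltRuns]
  | c :: t =>
    intro r hr
    rw [pvAltRuns] at hr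
    by_cases hc : PySem.Chars.isalpha c = true
    · simp [hc] at hr
      rcases hr with h | h
      · rw [h]; omega
      · exact pvAltRuns_pos _ r h
    · simp [hc] at hr
      exact pvAltRuns_pos t r hr
termination_by cs.length
decreasing_by
  · exact Nat.lt_succ_of_le (List.length_dropWhile_le _ _)
  · exact Nat.lt_succ_self _

theorem pvMaxD_eq_foldl (rs : List Int) (hpos : ∀ r ∈ rs, 1 ≤ r) :
    PySem.List.maxD rs (fun x => x) 0 = List.foldl max 0 rs := by
  cases rs with
  | nil => simp [PySem.List.maxD, PySem.List.max?]
  | cons x t =>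
    rw [PySem.List.maxD, PySem.List.max?_id_cons]
    simp only [Option.getD_some, List.foldl_cons]
    have hx : max (0 : Int) x = x := by
      have := hpos x (List.mem_cons_self); omega
    rw [hx]

-- ===== VERDICT (by name: the statement is the Claim_ definition above) =====
theorem largest_alpha_subset_spec : Claim_equal_largest_alpha_subset := by
  intro text _
  show largest_alpha_subset text = largest_alpha_subset_alt text
  rw [largest_alpha_subset_alt, pvMaxD_eq_foldl _ (pvAltRuns_pos _), ← pvMain]
  rfl
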